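-- pv_equiv track=rewrite | github.com/yukiman76/TerraNex-tokenizer | train_tokenizer_parquet_final.py | _map_language_to_category
-- ===== SOURCE A (Python) =====
-- def _map_language_to_category(language_code: str) -> str:
--     """Map ISO language codes to our categories dynamically"""
--     if not language_code:
--         return 'unknown'
--
--     code = language_code.lower().strip()
--
--     # ISO 639-1 and 639-3 mappings (no hardcoding of datasets, just standard language codes)
--     language_mappings = {
--         'nordic': {
--             # ISO 639-1
--             'sv', 'da', 'no', 'fi', 'is',
--             # ISO 639-3
--             'swe', 'dan', 'nor', 'fin', 'isl', 'nno', 'nob', 'sme', 'fao'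
--         },
--         'english': {
--             'en', 'eng'
--         },
--         'european': {
--             # Major European languages
--             'de', 'fr', 'es', 'it', 'nl', 'pl', 'pt', 'ro', 'hu', 'cs', 'sk', 'bg', 'hr', 'sl', 'et', 'lv', 'lt',
--             'deu', 'fra', 'spa', 'ita', 'nld', 'pol', 'por', 'ron', 'hun', 'ces', 'slk', 'bul', 'hrv', 'slv', 'est', 'lav', 'lit'
--         },
--         'code': {
--             # This would be detected via content analysis, not language codes
--             # But we can leave this for potential filename patterns
--         }
--     }
--
--     # Check mappings
--     for category, codes in language_mappings.items():
--         if code in codes: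
--             return category
--
--     return 'unknown'
-- ===== SOURCE B (Python) =====
-- # Reverse lookup table built once: code -> category (the empty 'code' category contributes no codes).
-- _REVERSE = {
--     'sv': 'nordic',
--     'da': 'nordic',
--     'no': 'nordic',
--     'fi': 'nordic',
--     'is': 'nordic',
--     'swe': 'nordic',
--     'dan': 'nordic',
--     'nor': 'nordic',
--     'fin': 'nordic',
--     'isl': 'nordic',
--     'nno': 'nordic',
--     'nob': 'nordic',
--     'sme': 'nordic',
--     'fao': 'nordic',
--     'en': 'english',
--     'eng': 'english',
--     'de': 'european',
--     'fr': 'european',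
--     'es': 'european',
--     'it': 'european',
--     'nl': 'european',
--     'pl': 'european',
--     'pt': 'european',
--     'ro': 'european',
--     'hu': 'european',
--     'cs': 'european',
--     'sk': 'european',
--     'bg': 'european',
--     'hr': 'european',
--     'sl': 'european',
--     'et': 'european',
--     'lv': 'european',
--     'lt': 'european',
--     'deu': 'european',
--     'fra': 'european',
--     'spa': 'european',
--     'ita': 'european',
--     'nld': 'european',
--     'pol': 'european',
--     'por': 'european',
--     'ron': 'european',
--     'hun': 'european',
--     'ces': 'european',
--     'slk': 'european',
--     'bul': 'european',
--     'hrv': 'european',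
--     'slv': 'european',
--     'est': 'european',
--     'lav': 'european',
--     'lit': 'european',
-- }
--
--
-- def _map_language_to_category(language_code: str) -> str:
--     if not language_code:
--         return 'unknown'
--     return _REVERSE.get(language_code.lower().strip(), 'unknown')
-- ===== Notes on version B (the rewrite author's own statement) =====
-- stated objective: simpler
-- what changed: Replaced the loop that scans each category's code-set with a single module-level reverse dict code->category and one .get() lookup.
import Mathlib
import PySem

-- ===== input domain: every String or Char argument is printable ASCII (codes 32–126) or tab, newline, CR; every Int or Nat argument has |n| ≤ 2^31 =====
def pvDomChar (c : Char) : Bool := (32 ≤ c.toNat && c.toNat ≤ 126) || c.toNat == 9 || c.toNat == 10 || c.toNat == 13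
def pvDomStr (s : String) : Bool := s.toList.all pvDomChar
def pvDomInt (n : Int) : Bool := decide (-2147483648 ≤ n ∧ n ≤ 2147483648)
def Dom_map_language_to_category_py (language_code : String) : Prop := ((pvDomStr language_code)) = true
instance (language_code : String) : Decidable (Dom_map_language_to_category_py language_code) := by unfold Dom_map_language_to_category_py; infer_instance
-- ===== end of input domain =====

set_option maxRecDepth 4000


-- B replaces A's loop over a dict of category→code-set with a single prebuilt reverse dict code→category (simpler lookup table).

-- ===== PORT A =====
-- A's dict literal category → set of codes, built once inside the function body; ported as a helper.
def pvLanguageMappings : PySem.Dict String (PySem.Set String) :=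
  PySem.Dict.ofList
    [ ("nordic", PySem.Set.ofList ["sv", "da", "no", "fi", "is", "swe", "dan", "nor", "fin", "isl", "nno", "nob", "sme", "fao"]),
      ("english", PySem.Set.ofList ["en", "eng"]),
      ("european", PySem.Set.ofList ["de", "fr", "es", "it", "nl", "pl", "pt", "ro", "hu", "cs", "sk", "bg", "hr", "sl", "et", "lv", "lt", "deu", "fra", "spa", "ita", "nld", "pol", "por", "ron", "hun", "ces", "slk", "bul", "hrv", "slv", "est", "lav", "lit"]),
      ("code", PySem.Set.ofList ([] : List String)) ]

-- the for-loop over language_mappings.items(): first category whose set contains code, else "unknown"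
def pvCheckLoop (code : String) : List (String × PySem.Set String) → String
  | [] => "unknown"
  | (category, codes) :: rest =>
      if PySem.Set.contains codes code then category else pvCheckLoop code rest

def map_language_to_category_py (language_code : String) : String :=
  if language_code == "" then "unknown"
  else
    let code := PySem.Str.strip (PySem.Str.lower language_code)
    pvCheckLoop code pvLanguageMappings.items

-- ===== PORT B =====
-- Source B's module-level reverse dict literal code → category
def pvReverse : PySem.Dict String String :=
  PySem.Dict.ofList [("sv", "nordic"), ("da", "nordic"), ("no", "nordic"), ("fi", "nordic"), ("is", "nordic"), ("swe", "nordic"), ("dan", "nordic"), ("nor", "nordic"), ("fin", "nordic"), ("isl", "nordic"), ("nno", "nordic"), ("nob", "nordic"), ("sme", "nordic"), ("fao", "nordic"), ("en", "english"), ("eng", "english"), ("de", "european"), ("fr", "european"), ("es", "european"), ("it", "european"), ("nl", "european"), ("pl", "european"), ("pt", "european"), ("ro", "european"), ("hu", "european"), ("cs", "european"), ("sk", "european"), ("bg", "european"), ("hr", "european"), ("sl", "european"), ("et", "european"), ("lv", "european"), ("lt", "european"), ("deu", "european"), ("fra", "european"), ("spa", "european"), ("ita", "european"), ("nld", "european"),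 ("pol", "european"), ("por", "european"), ("ron", "european"), ("hun", "european"), ("ces", "european"), ("slk", "european"), ("bul", "european"), ("hrv", "european"), ("slv", "european"), ("est", "european"), ("lav", "european"), ("lit", "european")]

def map_language_to_category_py_alt (language_code : String) : String :=
  if language_code == "" then "unknown"
  else PySem.Dict.getD pvReverse (PySem.Str.strip (PySem.Str.lower language_code)) "unknown"

-- ===== PRECONDITION & SPEC =====
def Spec_map_language_to_category_py (language_code : String) (out : String) : Prop := out = map_language_to_category_py_alt language_code
instance (language_code : String) (out : String) : Decidable (Spec_map_language_to_category_py language_code out) := by unfold Spec_map_language_to_category_py; infer_instance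

-- ===== CLAIM (what is proved, stated in full; the proofs are below) =====
def Claim_equal_map_language_to_category_py : Prop := ∀ (language_code : String), Dom_map_language_to_category_py language_code → Spec_map_language_to_category_py language_code (map_language_to_category_py language_code)

-- ===== LEMMAS AND PROOFS =====

-- the groups of A's dict, as a plain list (values as plain code lists)
def pvGroups : List (String × List String) :=
  [ ("nordic", ["sv", "da", "no", "fi", "is", "swe", "dan", "nor", "fin", "isl", "nno", "nob", "sme", "fao"]),
    ("english", ["en", "eng"]),
    ("european", ["de", "fr", "es", "it", "nl", "pl", "pt", "ro", "hu", "cs", "sk", "bg", "hr", "sl", "et", "lv", "lt", "deu", "fra", "spa", "ita", "nld", "pol", "por", "ron", "hun", "ces", "slk", "bul", "hrv", "slv", "est", "lav", "lit"]),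
    ("code", ([] : List String)) ]

lemma pv_items_eq : pvLanguageMappings.items = pvGroups := by decide

lemma pv_reverse_eq :
    pvReverse = PySem.Dict.mk (pvGroups.flatMap (fun g => g.2.map (fun c => (c, g.1)))) := by decide

-- looking a key up in a block of pairs all mapping to `cat`, followed by `rest`
lemma pv_getD_block (code d cat : String) (codes : List String) (rest : List (String × String)) :
    (PySem.Dict.mk (codes.map (fun c => (c, cat)) ++ rest)).getD code d =
      if codes.contains code then cat else (PySem.Dict.mk rest).getD code d := by
  induction codes with
  | nil => simp
  | cons c cs ih =>
      simp only [List.map_cons, List.cons_append, PySem.Dict.getD_eq_get?_getD,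
        PySem.Dict.get?_mk_cons, List.contains_cons]
      by_cases h : c = code
      · simp [h]
      · have h1 : (c == code) = false := beq_eq_false_iff_ne.mpr h
        have h2 : (code == c) = false := beq_eq_false_iff_ne.mpr (fun e => h e.symm)
        simpa [h1, h2] using ih

-- the reverse-dict lookup equals A's first-match loop over the groups
lemma pv_lookup_eq_loop (code : String) (groups : List (String × List String)) :
    (PySem.Dict.mk (groups.flatMap (fun g => g.2.map (fun c => (c, g.1))))).getD code "unknown" =
      pvCheckLoop code groups := by
  induction groups with
  | nil =>
      simp [pvCheckLoop, show PySem.Dict.mk ([] : List (String × String)) = PySem.Dict.empty from rfl]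
  | cons g rest ih =>
      simp only [List.flatMap_cons, pv_getD_block, pvCheckLoop, ih]
      rfl

-- ===== VERDICT (by name: the statement is the Claim_ definition above) =====
theorem map_language_to_category_py_spec : Claim_equal_map_language_to_category_py := by
  intro language_code _
  unfold Spec_map_language_to_category_py map_language_to_category_py map_language_to_category_py_alt
  by_cases h : language_code == ""
  · simp [h]
  · simp only [h, Bool.false_eq_true, if_false, pv_items_eq, pv_reverse_eq]
    exact (pv_lookup_eq_loop _ _).symm
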